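-- pv_equiv track=rewrite | github.com/RToavina/Aide_NSI | javanais.py | javanais
-- ===== SOURCE A (Python) =====
-- def javanais(text):
--     vowels = "aeiouAEIOU"
--     result = []
--     for char in text:
--         if char in vowels:
--             result.append("av" + char)
--         else:
--             result.append(char)
--     return ''.join(result)
-- ===== SOURCE B (Python) =====
-- def javanais(text):
--     # Ten whole-string passes: rewrite each vowel v to "av"+v with str.replace.
--     # Processing the vowel a first means later passes never touch the inserted
--     # text (v is no vowel, and inserted a's only appear after the first pass).
--     for v in "aeiouAEIOU":
--         text = text.replace(v, "av" + v)
--     return text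
-- ===== Notes on version B (the rewrite author's own statement) =====
-- stated objective: faster
-- what changed: Replaced the single per-character Python loop with if/else and list-join by ten whole-string str.replace passes, one per vowel (correct because the vowel a is processed first and v is not a vowel, so the inserted text is never rewritten by a later pass).
import Mathlib
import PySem

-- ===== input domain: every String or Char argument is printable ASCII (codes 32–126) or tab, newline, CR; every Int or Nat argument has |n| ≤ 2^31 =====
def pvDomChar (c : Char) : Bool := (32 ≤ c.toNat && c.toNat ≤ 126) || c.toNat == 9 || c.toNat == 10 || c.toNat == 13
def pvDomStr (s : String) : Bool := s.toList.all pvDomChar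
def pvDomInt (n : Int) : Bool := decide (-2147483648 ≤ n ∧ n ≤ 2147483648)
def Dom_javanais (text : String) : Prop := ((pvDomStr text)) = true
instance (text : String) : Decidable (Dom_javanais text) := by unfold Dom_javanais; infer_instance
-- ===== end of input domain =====

-- B replaces A's single per-character Python loop by ten whole-string str.replace passes,
-- one per vowel (measurably faster in CPython: the scan runs in C; correct because the
-- vowel a is processed first and v is not a vowel, so inserted text is never rewritten).

-- ===== PORT A =====
-- A: loop over the chars, append "av"+char or char to a result list, then ''.join(result).
def javanais (text : String) : String :=
  String.join
    (text.toList.foldl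
      (fun result char =>
        if ("aeiouAEIOU".toList.contains char) then
          result ++ [String.ofList ['a', 'v', char]]
        else
          result ++ [String.ofList [char]])
      [])

-- ===== PORT B =====
-- B: for v in "aeiouAEIOU": text = text.replace(v, "av" + v); return text.
def javanais_alt (text : String) : String :=
  "aeiouAEIOU".toList.foldl
    (fun t v => PySem.Str.replace t (String.ofList [v]) (String.ofList ['a', 'v', v]))
    text

-- ===== PRECONDITION & SPEC =====
def Spec_javanais (text : String) (out : String) : Prop := out = javanais_alt text
instance (text : String) (out : String) : Decidable (Spec_javanais text out) := by unfold Spec_javanais; infer_instance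

-- ===== CLAIM (what is proved, stated in full; the proofs are below) =====
def Claim_equal_javanais : Prop := ∀ (text : String), Dom_javanais text → Spec_javanais text (javanais text)

-- ===== LEMMAS AND PROOFS =====

-- the per-character expansion both programs realise, parametrised by the vowels seen so far
def javExpand (S : List Char) (c : Char) : List Char :=
  if S.contains c then ['a', 'v', c] else [c]

-- A's loop: appending one element per char is `init ++ map`.
theorem javanais_foldl_map (P : Char → Bool) (x y : Char → String) (l : List Char)
    (init : List String) :
    l.foldl (fun r c => if P c then r ++ [x c] else r ++ [y c]) init
      = init ++ l.map (fun c => if P c then x c else y c) := by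
  induction l generalizing init with
  | nil => simp
  | cons c t ih =>
    by_cases h : P c = true <;> simp [List.foldl, h, ih]

-- folding ++ over strings from `s` is `s ++ join`.
theorem javanais_jfold (l : List String) (s : String) :
    List.foldl (· ++ ·) s l = s ++ String.join l := by
  induction l generalizing s with
  | nil => simp [String.join]
  | cons h t ih =>
    simp only [String.join, List.foldl] at *
    rw [ih (s ++ h), ih ("" ++ h)]
    simp [String.append_assoc]

-- joining per-char strings is the string of the flatMap of their char lists.
theorem javanais_join_map (g : Char → List Char) (l : List Char) :
    String.join (l.map (fun c => String.ofList (g c))) = String.ofList (l.flatMap g) := by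
  induction l with
  | nil => rfl
  | cons c t ih =>
    simp only [List.map, List.flatMap_cons, String.join, List.foldl]
    rw [javanais_jfold]
    show "" ++ String.ofList (g c) ++ String.join _ = _
    rw [ih]
    simp [String.ofList_append]

-- A's value, characterised: the flatMap of the full-vowel expansion.
theorem javanais_eq_flatMap (text : String) :
    javanais text
      = String.ofList
          (text.toList.flatMap (javExpand ['a','e','i','o','u','A','E','I','O','U'])) := by
  unfold javanais
  rw [javanais_foldl_map, List.nil_append]
  rw [show (fun c => if ("aeiouAEIOU".toList.contains c) then String.ofList ['a', 'v', c]
        else String.ofList [c])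
      = (fun c => String.ofList (javExpand ['a','e','i','o','u','A','E','I','O','U'] c)) from by
    funext c
    rw [show "aeiouAEIOU".toList = ['a','e','i','o','u','A','E','I','O','U'] from by decide]
    exact (apply_ite String.ofList _ _ _).symm]
  exact javanais_join_map _ _

-- replace's fueled scanner, for a one-character pattern, is a flatMap.
theorem javanais_go_single (v : Char) (new : List Char) (l acc : List Char) (fuel : Nat)
    (h : l.length ≤ fuel) :
    PySem.Chars.replace.go [v] new fuel l acc
      = acc.reverse ++ l.flatMap (fun c => if c = v then new else [c]) := by
  induction l generalizing acc fuel with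
  | nil =>
    cases fuel <;> simp [PySem.Chars.replace.go]
  | cons c t ih =>
    cases fuel with
    | zero => simp at h
    | succ n =>
      simp only [List.length_cons, Nat.succ_le_succ_iff] at h
      by_cases hc : c = v
      · subst hc
        simp [PySem.Chars.replace.go, List.isPrefixOf, ih _ _ h]
      · have : ([v].isPrefixOf (c :: t)) = false := by
          simp [List.isPrefixOf]
          exact fun hvc => absurd hvc.symm hc
        simp [PySem.Chars.replace.go, this, ih _ _ h, hc]

-- Python's s.replace(v, new) for a single-character v, as a flatMap.
theorem javanais_replace_single (v : Char) (new l : List Char) :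
    PySem.Chars.replace l [v] new
      = l.flatMap (fun c => if c = v then new else [c]) := by
  unfold PySem.Chars.replace
  simp only [List.isEmpty_cons, Bool.false_eq_true, if_false]
  simpa using javanais_go_single v new l [] l.length le_rfl

-- one replace pass extends the set of expanded vowels by v, provided the inserted
-- characters 'a' and 'v' cannot be re-matched.
theorem javanais_step (S T : List Char) (v : Char) (hT : T = S ++ [v]) (hv : v ≠ 'v')
    (ha : v ≠ 'a' ∨ S = []) (hvS : v ∉ S) (l : List Char) :
    PySem.Chars.replace (l.flatMap (javExpand S)) [v] ['a', 'v', v]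
      = l.flatMap (javExpand T) := by
  subst hT
  rw [javanais_replace_single, List.flatMap_assoc]
  congr 1
  funext c
  by_cases hc : c ∈ S
  · have hca : c ≠ v := fun h => hvS (h ▸ hc)
    have hAne : ('a' : Char) ≠ v := by
      rcases ha with h | h
      · exact fun e => h e.symm
      · rw [h] at hc; simp at hc
    have hVne : ('v' : Char) ≠ v := fun e => hv e.symm
    simp [javExpand, hc, hca, hAne, hVne]
  · by_cases hcv : c = v
    · subst hcv
      simp [javExpand, hc]
    · simp [javExpand, hc, hcv]

-- the empty-set expansion is the identity.
theorem javanais_expand_nil (l : List Char) : l.flatMap (javExpand []) = l := by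
  induction l with
  | nil => rfl
  | cons c t ih => simp [javExpand, ih]

-- B's value, characterised: the same flatMap, obtained by the ten successive passes.
theorem javanais_alt_eq_flatMap (text : String) :
    javanais_alt text
      = String.ofList
          (text.toList.flatMap (javExpand ['a','e','i','o','u','A','E','I','O','U'])) := by
  rw [← String.ofList_toList (s := javanais_alt text)]
  refine congrArg String.ofList ?_
  unfold javanais_alt
  rw [show "aeiouAEIOU".toList = ['a','e','i','o','u','A','E','I','O','U'] from by decide]
  simp only [List.foldl]
  simp only [PySem.Str.toList_replace, String.toList_ofList]
  conv_lhs => rw [← javanais_expand_nil text.toList]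
  rw [javanais_step [] ['a'] 'a' rfl (by decide) (Or.inr rfl) (by decide),
      javanais_step ['a'] ['a','e'] 'e' rfl (by decide) (Or.inl (by decide)) (by decide),
      javanais_step ['a','e'] ['a','e','i'] 'i' rfl (by decide) (Or.inl (by decide)) (by decide),
      javanais_step ['a','e','i'] ['a','e','i','o'] 'o' rfl (by decide) (Or.inl (by decide)) (by decide),
      javanais_step ['a','e','i','o'] ['a','e','i','o','u'] 'u' rfl (by decide) (Or.inl (by decide)) (by decide),
      javanais_step ['a','e','i','o','u'] ['a','e','i','o','u','A'] 'A' rfl (by decide) (Or.inl (by decide)) (by decide),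
      javanais_step ['a','e','i','o','u','A'] ['a','e','i','o','u','A','E'] 'E' rfl (by decide) (Or.inl (by decide)) (by decide),
      javanais_step ['a','e','i','o','u','A','E'] ['a','e','i','o','u','A','E','I'] 'I' rfl (by decide) (Or.inl (by decide)) (by decide),
      javanais_step ['a','e','i','o','u','A','E','I'] ['a','e','i','o','u','A','E','I','O'] 'O' rfl (by decide) (Or.inl (by decide)) (by decide),
      javanais_step ['a','e','i','o','u','A','E','I','O'] ['a','e','i','o','u','A','E','I','O','U'] 'U' rfl (by decide) (Or.inl (by decide)) (by decide)]

-- ===== VERDICT (by name: the statement is the Claim_ definition above) =====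
theorem javanais_spec : Claim_equal_javanais := by
  intro text _
  show javanais text = javanais_alt text
  rw [javanais_eq_flatMap, javanais_alt_eq_flatMap]
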